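-- pv_equiv track=rewrite | github.com/aldairmh98/sintaxisAlgol | expression.py | searchCloseParentesis
-- ===== SOURCE A (Python) =====
-- def searchCloseParentesis(cad):
--     limit = len(cad)
--     myidx = limit
--     for c in cad:
--         myidx-= 1
--         if cad[myidx] == ')':
--             return myidx
--     return -1
-- ===== SOURCE B (Python) =====
-- def searchCloseParentesis(cad):
--     result = -1
--     for i, c in enumerate(cad):
--         if c == ')':
--             result = i
--     return result
-- ===== Notes on version B (the rewrite author's own statement) =====
-- stated objective: simpler
-- what changed: Forward enumerate scan keeping the last ')' index with no early return, instead of A's backward-index walk with early return and repeated indexing cad[myidx].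
import Mathlib
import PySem

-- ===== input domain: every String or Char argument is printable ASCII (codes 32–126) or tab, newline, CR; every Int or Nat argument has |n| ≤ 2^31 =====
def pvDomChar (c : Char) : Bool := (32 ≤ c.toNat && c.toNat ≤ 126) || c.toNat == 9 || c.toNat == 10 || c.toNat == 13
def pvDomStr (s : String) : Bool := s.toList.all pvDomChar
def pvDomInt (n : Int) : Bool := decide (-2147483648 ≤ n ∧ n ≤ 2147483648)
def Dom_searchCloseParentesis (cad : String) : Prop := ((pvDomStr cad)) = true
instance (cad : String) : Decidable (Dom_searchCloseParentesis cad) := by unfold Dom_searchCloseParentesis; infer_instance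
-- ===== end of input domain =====

-- ===== PORT A =====
-- B changes A's backward early-return index walk into a forward enumerate scan keeping the last match (objective: simpler).
-- Loop of A: `for c in cad` only counts iterations; myidx counts down and cad[myidx] is tested.
def pvr_aLoop (full : List Char) (myidx : Int) : List Char → Int
  | [] => -1
  | _ :: rest =>
    let m := myidx - 1
    if PySem.List.pyGet? full m = some ')' then m else pvr_aLoop full m rest

def searchCloseParentesis (cad : String) : Int :=
  let l := cad.toList
  pvr_aLoop l (l.length : Int) l

-- ===== PORT B =====
def searchCloseParentesis_alt (cad : String) : Int :=
  cad.toList.zipIdx.foldl (fun res p => if p.1 = ')' then (p.2 : Int) else res) (-1)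

-- ===== PRECONDITION & SPEC =====
def Spec_searchCloseParentesis (cad : String) (out : Int) : Prop := out = searchCloseParentesis_alt cad
instance (cad : String) (out : Int) : Decidable (Spec_searchCloseParentesis cad out) := by unfold Spec_searchCloseParentesis; infer_instance

-- ===== CLAIM (what is proved, stated in full; the proofs are below) =====
def Claim_equal_searchCloseParentesis : Prop := ∀ (cad : String), Dom_searchCloseParentesis cad → Spec_searchCloseParentesis cad (searchCloseParentesis cad)

-- ===== LEMMAS AND PROOFS =====

-- canonical value: greatest index j < k with full[j] = ')' , else -1
def pvr_lastIdxBelow (full : List Char) : Nat → Int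
  | 0 => -1
  | k+1 => if full[k]? = some ')' then (k : Int) else pvr_lastIdxBelow full k

theorem pvr_aLoop_eq (full : List Char) (rest : List Char) (k : Nat)
    (hk : k = rest.length) (hle : k ≤ full.length) :
    pvr_aLoop full (k : Int) rest = pvr_lastIdxBelow full k := by
  induction rest generalizing k with
  | nil => subst hk; simp [pvr_aLoop, pvr_lastIdxBelow]
  | cons c rest ih =>
    subst hk
    have h1 : (((rest.length + 1 : Nat) : Int) - 1) = ((rest.length : Nat) : Int) := by push_cast; ring
    have hlt : rest.length < full.length := by simpa using hle
    have hget : PySem.List.pyGet? full ((rest.length : Nat) : Int) = full[rest.length]? := by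
      simp [PySem.List.pyGet?, PySem.List.pyIdx?, hlt]
    simp only [List.length_cons, pvr_aLoop, pvr_lastIdxBelow, h1, hget]
    split
    · rfl
    · exact ih rest.length rfl (Nat.le_of_lt hlt)

theorem pvr_lastIdxBelow_append (l : List Char) (c : Char) (k : Nat) (hk : k ≤ l.length) :
    pvr_lastIdxBelow (l ++ [c]) k = pvr_lastIdxBelow l k := by
  induction k with
  | zero => rfl
  | succ k ih =>
    have hlt : k < l.length := hk
    have hg : (l ++ [c])[k]? = l[k]? := List.getElem?_append_left hlt
    simp [pvr_lastIdxBelow, hg, ih (Nat.le_of_lt hlt)]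

theorem pvr_foldB_eq (l : List Char) :
    l.zipIdx.foldl (fun res p => if p.1 = ')' then (p.2 : Int) else res) (-1)
      = pvr_lastIdxBelow l l.length := by
  induction l using List.reverseRecOn with
  | nil => rfl
  | append_singleton l c ih =>
    rw [List.zipIdx_append, List.foldl_append]
    simp only [List.zipIdx, List.foldl_cons, List.foldl_nil, List.length_append,
      List.length_singleton]
    by_cases hc : c = ')'
    · simp [pvr_lastIdxBelow, hc]
    · simp [pvr_lastIdxBelow, hc,
        ih, pvr_lastIdxBelow_append l c l.length (Nat.le_refl l.length)]

-- ===== VERDICT (by name: the statement is the Claim_ definition above) =====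
theorem searchCloseParentesis_spec : Claim_equal_searchCloseParentesis := by
  intro cad _
  unfold Spec_searchCloseParentesis searchCloseParentesis searchCloseParentesis_alt
  rw [pvr_foldB_eq, pvr_aLoop_eq cad.toList cad.toList cad.toList.length rfl (Nat.le_refl _)]
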